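-- pv_equiv track=rewrite | github.com/yooooonzzzzzang/Algo_seed | 프로그래머스/lv2/42586. 기능개발/기능개발.py | solution
-- ===== SOURCE A (Python) =====
-- import math
--
-- def solution(progresses, speeds):
--     answer = []
--     day = []
--
--     for i in range(len(progresses)):
--         day.append(math.ceil((100 - progresses[i])/speeds[i]))
--     n = len(day)
--     now = 0
--     answer = []
--     for i in range(1,n):
--         if day[i] > day[now]:
--             answer.append(i - now)
--             now = i
--     answer.append(n-now)
--
--     return answer
-- ===== SOURCE B (Python) =====
-- import math
--
-- def solution(progresses, speeds):
--     days = [math.ceil((100 - p) / s) for p, s in zip(progresses, speeds)]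
--
--     def batches(ds):
--         if not ds:
--             return []
--         cut = next((i for i, d in enumerate(ds) if d > ds[0]), len(ds))
--         return [cut] + batches(ds[cut:])
--
--     return batches(days)
-- ===== Notes on version B (the rewrite author's own statement) =====
-- stated objective: alternative
-- what changed: B replaces A's day[] table plus index-pointer linear scan with a recursive decomposition: it repeatedly finds the first feature whose day exceeds the current batch leader's, emits that batch's length, slices it off and recurses on the remainder.
-- intended difference: On empty progresses A returns [0] (an artifact of its unconditional final append), while B returns [], the intended 'no features, no deployment batches' answer. — e.g. on solution([], []): A returns [0], B returns []
import Mathlib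
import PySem

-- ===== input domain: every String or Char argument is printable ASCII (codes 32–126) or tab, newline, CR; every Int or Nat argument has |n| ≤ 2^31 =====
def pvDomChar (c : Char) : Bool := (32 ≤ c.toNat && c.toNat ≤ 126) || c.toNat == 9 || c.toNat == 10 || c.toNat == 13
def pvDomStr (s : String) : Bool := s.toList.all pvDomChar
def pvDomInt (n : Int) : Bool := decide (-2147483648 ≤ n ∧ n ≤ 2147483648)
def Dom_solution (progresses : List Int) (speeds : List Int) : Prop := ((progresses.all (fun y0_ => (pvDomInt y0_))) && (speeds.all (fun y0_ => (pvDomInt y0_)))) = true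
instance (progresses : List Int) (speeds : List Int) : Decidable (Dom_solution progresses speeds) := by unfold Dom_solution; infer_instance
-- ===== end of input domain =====

-- B replaces A's day[] table + index-pointer scan with a recursive batch-slicing decomposition
-- (find the first day exceeding the batch leader's, cut, recurse); on empty input A's [0] vs B's [] is the stated D_.


-- ===== PORT A =====
-- math.ceil((100-p)/s) is ported as the exact integer ceiling division -((-(100-p)) // s);
-- on the |n| ≤ 2^31 domain the float quotient's rounding error is below the distance to the
-- nearest other integer, so this is exact.
-- body of A's second loop ('if day[i] > day[now]: answer.append(i - now); now = i'), state (now, answer)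
def pvStepA (day : List Int) (st : Int × List Int) (i : Int) : Int × List Int :=
  if PySem.List.pyGetD day i 0 > PySem.List.pyGetD day st.1 0 then
    (i, st.2 ++ [i - st.1])
  else st

def solution (progresses : List Int) (speeds : List Int) : List Int :=
  let day : List Int := (PySem.List.pyRange 0 (PySem.List.len progresses) 1).foldl
    (fun acc i => acc ++ [-(PySem.Int.floordiv
        (-(100 - PySem.List.pyGetD progresses i 0))
        (PySem.List.pyGetD speeds i 0))]) []
  let n := day.length
  let st := (PySem.List.pyRange 1 (n : Int) 1).foldl (pvStepA day) (0, [])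
  st.2 ++ [(n : Int) - st.1]

-- ===== PORT B =====
-- days comprehension: math.ceil((100-p)/s) as exact integer ceiling division (see note above)
def pvCeil (ps : Int × Int) : Int := -(PySem.Int.floordiv (-(100 - ps.1)) ps.2)

-- B's recursive helper 'batches': 'next((i for i, d in enumerate(ds) if d > ds[0]), len(ds))'
-- is the first index whose element exceeds ds[0] (= List.findIdx, which returns the length when
-- no element matches), then '[cut] + batches(ds[cut:])'
def pvBatches : List Int → List Int
  | [] => []
  | d :: rest =>
    let cut := List.findIdx (fun x => decide (d < x)) (d :: rest)
    ((cut : Nat) : Int) :: pvBatches ((d :: rest).drop cut)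
termination_by ds => ds.length
decreasing_by
  have h1 : 1 ≤ List.findIdx (fun x => decide (d < x)) (d :: rest) := by
    rw [List.findIdx_cons]; simp
  simp only [List.length_drop, List.length_cons]
  omega

def solution_alt (progresses : List Int) (speeds : List Int) : List Int :=
  let days := (progresses.zip speeds).map pvCeil
  pvBatches days

-- ===== PRECONDITION & SPEC =====
-- Pre_ excludes exactly the inputs on which A raises: a progresses entry with no matching speed
-- (IndexError) or a zero speed among the used entries (ZeroDivisionError).
def Pre_solution (progresses : List Int) (speeds : List Int) : Prop :=
  progresses.length ≤ speeds.length ∧ ∀ s ∈ speeds.take progresses.length, s ≠ 0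
instance (progresses : List Int) (speeds : List Int) : Decidable (Pre_solution progresses speeds) := by unfold Pre_solution; infer_instance

def pvWitness_solution : List Int × List Int := ([93, 30, 55], [1, 30, 5])

-- On empty progresses A returns [0] (an artifact of its unconditional final append), while B
-- returns [], the intended 'no features, no deployment batches' answer.
def D_solution (progresses : List Int) (speeds : List Int) : Prop := progresses = []
instance (progresses : List Int) (speeds : List Int) : Decidable (D_solution progresses speeds) := by unfold D_solution; infer_instance

def Spec_solution (progresses : List Int) (speeds : List Int) (out : List Int) : Prop :=
  ¬ D_solution progresses speeds → out = solution_alt progresses speeds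
instance (progresses : List Int) (speeds : List Int) (out : List Int) : Decidable (Spec_solution progresses speeds out) := by unfold Spec_solution; infer_instance

def pvDiffWitness_solution : List Int × List Int := ([], [])
def pvDiffWitnessOut_solution : (List Int) × (List Int) := ([0], [])

-- ===== CLAIM (what is proved, stated in full; the proofs are below) =====
def Claim_unchanged_solution : Prop := ∀ (progresses : List Int) (speeds : List Int), Dom_solution progresses speeds → Pre_solution progresses speeds → Spec_solution progresses speeds (solution progresses speeds)
def Claim_changed_solution : Prop := Dom_solution (pvDiffWitness_solution.1) (pvDiffWitness_solution.2) ∧ Pre_solution (pvDiffWitness_solution.1) (pvDiffWitness_solution.2) ∧ D_solution (pvDiffWitness_solution.1) (pvDiffWitness_solution.2) ∧ solution (pvDiffWitness_solution.1) (pvDiffWitness_solution.2) = pvDiffWitnessOut_solution.1 ∧ solution_alt (pvDiffWitness_solution.1) (pvDiffWitness_solution.2) = pvDiffWitnessOut_solution.2 ∧ pvDiffWitnessOut_solution.1 ≠ pvDiffWitnessOut_solution.2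
def Claim_exact_solution : Prop := ∀ (progresses : List Int) (speeds : List Int), Dom_solution progresses speeds → Pre_solution progresses speeds → D_solution progresses speeds → solution progresses speeds ≠ solution_alt progresses speeds

-- ===== LEMMAS AND PROOFS =====

-- abstract grouping semantics of A's second loop: ds the remaining days, lead the current
-- batch leader's day, count the current batch's size so far
def pvGo (lead : Int) (count : Int) : List Int → List Int
  | [] => [count]
  | d :: rest => if lead < d then count :: pvGo d 1 rest else pvGo lead (count + 1) rest

lemma pvBatches_cons (d : Int) (rest : List Int) :
    pvBatches (d :: rest) =
      ((List.findIdx (fun x => decide (d < x)) rest + 1 : Nat) : Int) ::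
        pvBatches (rest.drop (List.findIdx (fun x => decide (d < x)) rest)) := by
  rw [pvBatches]
  simp [List.findIdx_cons]

def pvAddHead (m : Int) : List Int → List Int
  | [] => []
  | k :: ks => (m + k) :: ks

lemma go_eq_batches (rest : List Int) : ∀ (d c : Int),
    pvGo d c rest = pvAddHead (c - 1) (pvBatches (d :: rest)) := by
  induction rest with
  | nil =>
    intro d c
    simp [pvGo, pvBatches_cons, pvAddHead, pvBatches]
  | cons x xs ih =>
    intro d c
    rw [pvBatches_cons, List.findIdx_cons]
    by_cases h : d < x
    · simp only [pvGo, h, if_pos, decide_true, cond_true, List.drop_zero,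
        Nat.zero_add, Nat.cast_one, pvAddHead]
      rw [ih x 1, pvBatches_cons, pvAddHead]
      norm_num
    · simp only [pvGo, h, if_neg, not_false_eq_true, decide_false, cond_false]
      rw [ih d (c + 1), pvBatches_cons, pvAddHead, pvAddHead]
      simp only [List.drop_succ_cons]
      congr 1
      push_cast; ring

-- A's second loop, from index j with batch start 'now', is pvGo on the dropped suffix
lemma a_go (ds : List Int) : ∀ (fuel j now : Nat) (ans : List Int),
    ds.length - j = fuel → now < j → j ≤ ds.length →
    ((PySem.List.pyRange (j : Int) (ds.length : Int) 1).foldl (pvStepA ds) ((now : Int), ans)).2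
      ++ [(ds.length : Int) -
        ((PySem.List.pyRange (j : Int) (ds.length : Int) 1).foldl (pvStepA ds) ((now : Int), ans)).1]
      = ans ++ pvGo (ds.getD now 0) ((j : Int) - now) (ds.drop j) := by
  intro fuel
  induction fuel with
  | zero =>
    intro j now ans hf hnj hj
    have hjl : j = ds.length := by omega
    have hr : PySem.List.pyRange (j : Int) (ds.length : Int) 1 = [] := by
      rw [hjl]; simp [PySem.List.pyRange]
    rw [hr, hjl]
    simp [pvGo, List.drop_length]
  | succ fuel ih =>
    intro j now ans hf hnj hj
    have hjlt : j < ds.length := by omega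
    have hnlt : now < ds.length := by omega
    rw [PySem.List.pyRange_one_cons (by exact_mod_cast hjlt)]
    simp only [List.foldl_cons]
    have hdrop : ds.drop j = ds[j] :: ds.drop (j + 1) := List.drop_eq_getElem_cons hjlt
    have hgn : ds.getD now 0 = ds[now] := List.getD_eq_getElem _ _ hnlt
    by_cases h : ds[now] < ds[j]
    · have hstep : pvStepA ds ((now : Int), ans) (j : Int) =
          (((j : Nat) : Int), ans ++ [(j : Int) - (now : Int)]) := by
        simp [pvStepA, PySem.List.pyGetD_natCast, List.getElem?_eq_getElem hjlt,
          List.getElem?_eq_getElem hnlt, h]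
      rw [hstep]
      have hih := ih (j + 1) j (ans ++ [(j : Int) - (now : Int)]) (by omega) (by omega) (by omega)
      rw [(by push_cast; ring : (((j + 1 : Nat) : Int)) = (j : Int) + 1)] at hih
      rw [hih, hdrop]
      simp only [pvGo, hgn, List.getD_eq_getElem _ _ hjlt, h, if_pos]
      push_cast
      simp [List.append_assoc]
    · have hstep : pvStepA ds ((now : Int), ans) (j : Int) = ((now : Int), ans) := by
        simp [pvStepA, PySem.List.pyGetD_natCast, List.getElem?_eq_getElem hjlt,
          List.getElem?_eq_getElem hnlt, h]
      rw [hstep]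
      have hih := ih (j + 1) now ans (by omega) (by omega) (by omega)
      rw [(by push_cast; ring : (((j + 1 : Nat) : Int)) = (j : Int) + 1)] at hih
      rw [hih, hdrop]
      simp only [pvGo, hgn, h, if_neg, not_false_eq_true]
      have heq : ((j : Int) + 1) - (now : Int) = ((j : Int) - now) + 1 := by ring
      rw [heq]

-- under Pre_, A's day table is exactly the zip image
lemma day_eq (progresses speeds : List Int) (hp : Pre_solution progresses speeds) :
    (PySem.List.pyRange 0 (PySem.List.len progresses) 1).foldl
      (fun acc i => acc ++ [-(PySem.Int.floordiv
          (-(100 - PySem.List.pyGetD progresses i 0))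
          (PySem.List.pyGetD speeds i 0))]) [] =
    (progresses.zip speeds).map pvCeil := by
  rw [PySem.List.foldl_append_singleton_eq_map, List.nil_append,
    PySem.List.len_eq, PySem.List.pyRange_zero_natCast, List.map_map]
  apply List.ext_getElem
  · simp [Nat.min_eq_left hp.1]
  · intro i h1 h2
    have hip : i < progresses.length := by simpa using h1
    have his : i < speeds.length := Nat.lt_of_lt_of_le hip hp.1
    rw [List.getElem_map, List.getElem_map, List.getElem_range, List.getElem_zip]
    simp only [Function.comp_apply, pvCeil]
    rw [PySem.List.pyGetD_natCast, PySem.List.pyGetD_natCast,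
      List.getD_eq_getElem _ _ hip, List.getD_eq_getElem _ _ his]

lemma addHead_zero_batches (d : Int) (rest : List Int) :
    pvAddHead 0 (pvBatches (d :: rest)) = pvBatches (d :: rest) := by
  rw [pvBatches_cons, pvAddHead]
  norm_num

-- ===== VERDICT (by name: the statement is the Claim_ definition above) =====
theorem solution_spec : Claim_unchanged_solution := by
  intro progresses speeds _ hp
  unfold Spec_solution
  intro hnd
  unfold D_solution at hnd
  unfold solution solution_alt
  rw [day_eq progresses speeds hp]
  cases hz : (progresses.zip speeds).map pvCeil with
  | nil =>
    exfalso
    apply hnd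
    cases progresses with
    | nil => rfl
    | cons p ps =>
      cases speeds with
      | nil => simp [Pre_solution] at hp
      | cons s ss => simp at hz
  | cons d ds =>
    have hih := a_go (d :: ds) ds.length 1 0 [] (by simp) (by omega) (by simp)
    push_cast at hih ⊢
    rw [hih, go_eq_batches]
    norm_num [addHead_zero_batches]

theorem solution_changed : Claim_changed_solution := by
  unfold Claim_changed_solution
  refine ⟨by decide, by decide, by decide, by decide, ?_, by decide⟩
  show solution_alt [] [] = []
  simp [solution_alt, pvBatches]

theorem solution_tight : Claim_exact_solution := by
  intro progresses speeds _ _ hd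
  unfold D_solution at hd
  subst hd
  have hA : solution [] speeds = [0] := by
    simp [solution, PySem.List.len, PySem.List.pyRange]
  have hB : solution_alt [] speeds = [] := by
    simp [solution_alt, pvBatches]
  rw [hA, hB]
  simp
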